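-- pv_equiv track=rewrite | github.com/Valhali/da-test | bot.py | podkr
-- ===== SOURCE A (Python) =====
-- def podkr(t):
--     r=""
--     for i in t:
--         if i==" ":
--             r+=" "
--         else:
--             r+="_"
--     return r
-- ===== SOURCE B (Python) =====
-- def podkr(t):
--     return " ".join("_" * len(w) for w in t.split(" "))
-- ===== Notes on version B (the rewrite author's own statement) =====
-- stated objective: idiomatic
-- what changed: Replaces the char-by-char string accumulation loop with a segment-wise computation: split on single spaces, map each run to a same-length underscore run, rejoin with spaces (bulk str operations instead of per-char concatenation).
import Mathlib
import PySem

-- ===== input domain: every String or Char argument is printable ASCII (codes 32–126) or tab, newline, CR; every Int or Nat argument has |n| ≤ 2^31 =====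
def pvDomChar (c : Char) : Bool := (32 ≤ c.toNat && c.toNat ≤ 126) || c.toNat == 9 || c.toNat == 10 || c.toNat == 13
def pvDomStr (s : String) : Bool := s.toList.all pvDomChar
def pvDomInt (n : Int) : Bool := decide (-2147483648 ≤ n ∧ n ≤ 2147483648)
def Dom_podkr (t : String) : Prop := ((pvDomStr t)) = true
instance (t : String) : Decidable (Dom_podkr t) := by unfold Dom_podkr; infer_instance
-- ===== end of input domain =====

-- B replaces A's char-by-char accumulation with split-on-space / underscore runs / rejoin (idiomatic decomposition; return value only, no side effects).

-- ===== PORT A =====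
-- r starts empty; each char appends ' ' or '_' (string concat ported over List Char, Lean's String.append being kernel-opaque)
def podkr (t : String) : String :=
  String.ofList (t.toList.foldl (fun r i => r ++ [if i == ' ' then ' ' else '_']) [])

-- ===== PORT B =====
-- ' '.join('_' * len(w) for w in t.split(' ')); split? is some since the separator " " is nonempty
def podkr_alt (t : String) : String :=
  PySem.Str.join " "
    (((PySem.Str.split? t " ").getD []).map (fun w => String.ofList (List.replicate (PySem.Str.len w).toNat '_')))

-- ===== PRECONDITION & SPEC =====
def Spec_podkr (t : String) (out : String) : Prop := out = podkr_alt t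
instance (t : String) (out : String) : Decidable (Spec_podkr t out) := by unfold Spec_podkr; infer_instance

-- ===== CLAIM (what is proved, stated in full; the proofs are below) =====
def Claim_equal_podkr : Prop := ∀ (t : String), Dom_podkr t → Spec_podkr t (podkr t)

-- ===== LEMMAS AND PROOFS =====

-- reference splitter: split a char list on single spaces, cur = current run accumulated so far
def pvSplitSp (cur : List Char) : List Char → List (List Char)
  | [] => [cur]
  | c :: rest => if c == ' ' then cur :: pvSplitSp [] rest else pvSplitSp (cur ++ [c]) rest

theorem pvSplitSp_ne_nil (cur : List Char) (cs : List Char) : pvSplitSp cur cs ≠ [] := by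
  induction cs generalizing cur with
  | nil => simp [pvSplitSp]
  | cons c rest ih =>
    simp only [pvSplitSp]
    split_ifs <;> simp [ih]

theorem splitOn_go_sp (fuel : Nat) :
    ∀ (l cur : List Char) (acc : List (List Char)), l.length < fuel →
      PySem.Chars.splitOn.go [' '] fuel l cur acc = acc.reverse ++ pvSplitSp cur.reverse l := by
  induction fuel with
  | zero => intro l cur acc h; omega
  | succ fuel ih =>
    intro l cur acc h
    cases l with
    | nil => simp [PySem.Chars.splitOn.go, pvSplitSp]
    | cons c rest =>
      simp only [PySem.Chars.splitOn.go, List.isPrefixOf, pvSplitSp]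
      by_cases hc : c = ' '
      · subst hc
        rw [if_pos (by decide), if_pos (by decide)]
        simp only [List.length_singleton, List.drop_succ_cons, List.drop_zero]
        rw [ih rest [] (cur.reverse :: acc) (by simp at h ⊢; omega)]
        simp
      · rw [if_neg (by simp [Ne.symm hc]), if_neg (by simp [hc])]
        rw [ih rest (c :: cur) acc (by simp at h ⊢; omega)]
        simp

theorem splitOn_sp (cs : List Char) : PySem.Chars.splitOn cs [' '] = pvSplitSp [] cs := by
  unfold PySem.Chars.splitOn
  rw [splitOn_go_sp (cs.length + 1) cs [] [] (by omega)]
  rfl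

theorem join_sp (cs : List Char) : ∀ cur : List Char,
    PySem.Chars.join [' '] ((pvSplitSp cur cs).map (fun w => List.replicate w.length '_'))
      = List.replicate cur.length '_' ++ cs.map (fun i => if i == ' ' then ' ' else '_') := by
  induction cs with
  | nil => intro cur; simp [pvSplitSp, PySem.Chars.join_singleton]
  | cons c rest ih =>
    intro cur
    simp only [pvSplitSp]
    by_cases hc : c == ' '
    · simp only [if_pos hc]
      obtain ⟨w, ws, hw⟩ : ∃ w ws, pvSplitSp ([] : List Char) rest = w :: ws := by
        cases hws : pvSplitSp ([] : List Char) rest with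
        | nil => exact absurd hws (pvSplitSp_ne_nil [] rest)
        | cons w ws => exact ⟨w, ws, rfl⟩
      have := ih ([] : List Char)
      rw [hw] at this ⊢
      simp only [List.map_cons, PySem.Chars.join_cons_cons]
      simp only [List.map_cons] at this
      rw [this]
      simp [hc]
    · simp only [if_neg hc]
      rw [ih (cur ++ [c])]
      simp only [List.length_append, List.length_singleton, List.map_cons, if_neg hc]
      rw [List.replicate_add]
      simp
theorem foldl_append_map (g : Char → Char) (cs : List Char) : ∀ acc : List Char,
    cs.foldl (fun r i => r ++ [g i]) acc = acc ++ cs.map g := by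
  induction cs with
  | nil => intro acc; simp
  | cons c rest ih => intro acc; simp [List.foldl_cons, ih]

-- ===== VERDICT (by name: the statement is the Claim_ definition above) =====
theorem podkr_spec : Claim_equal_podkr := by
  intro t _
  unfold Spec_podkr podkr podkr_alt
  obtain ⟨parts, hp⟩ : ∃ ps, PySem.Str.split? t " " = some ps := by
    have h := PySem.Str.split?_map t " "
    cases hq : PySem.Str.split? t " " with
    | none => rw [hq] at h; simp [PySem.Chars.split?] at h
    | some ps => exact ⟨ps, rfl⟩
  have hpl : parts.map String.toList = pvSplitSp [] t.toList := by
    have h := PySem.Str.split?_map t " "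
    rw [hp] at h
    simpa [PySem.Chars.split?, splitOn_sp] using h
  have key : (PySem.Str.join " "
      (parts.map (fun w => String.ofList (List.replicate (PySem.Str.len w).toNat '_')))).toList
      = t.toList.map (fun i => if i == ' ' then ' ' else '_') := by
    rw [PySem.Str.toList_join]
    have hmap : (parts.map (fun w => String.ofList (List.replicate (PySem.Str.len w).toNat '_'))).map String.toList
        = (pvSplitSp [] t.toList).map (fun w => List.replicate w.length '_') := by
      rw [← hpl]
      simp [PySem.Str.len_eq, Function.comp]
    rw [hmap]
    have := join_sp t.toList []
    simpa using this
  rw [hp, foldl_append_map (fun i => if i == ' ' then ' ' else '_') t.toList []]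
  simp only [Option.getD_some, List.nil_append]
  rw [← key, String.ofList_toList]
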